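-- pv_equiv track=rewrite | github.com/LleilaA13/Python-practice | exercise9/solution.py | es8
-- ===== SOURCE A (Python) =====
-- def es8(set_in):
--     ls_fin=[]
--     for p in set_in:
--         for p2 in set_in-{p}:
--             for i in range(2,len(p)+1):
--                 if p[-i:]==p2[:i]:
--                     ls_fin.append(p+p2[i:])
--                 else: continue
--     ls_fin=set(ls_fin)
--     ls_fin=list(ls_fin)
--     ls_fin.sort()
--     return ls_fin
-- ===== SOURCE B (Python) =====
-- def es8(set_in):
--     # Index every prefix of every string by (length, prefix); then for each
--     # string look up each of its suffixes instead of scanning all pairs.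
--     index = {}
--     for q in set_in:
--         for i in range(2, len(q) + 1):
--             index.setdefault((i, q[:i]), []).append((q, q[i:]))
--     out = set()
--     for p in set_in:
--         for i in range(2, len(p) + 1):
--             for q, rest in index.get((i, p[-i:]), ()):
--                 if q != p:
--                     out.add(p + rest)
--     return sorted(out)
-- ===== Notes on version B (the rewrite author's own statement) =====
-- stated objective: faster
-- what changed: Replaces A's all-pairs scan (every string against every other for every overlap length) with a hash index built once mapping each (length, prefix) to its strings, so each string's suffixes are looked up directly.
import Mathlib
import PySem

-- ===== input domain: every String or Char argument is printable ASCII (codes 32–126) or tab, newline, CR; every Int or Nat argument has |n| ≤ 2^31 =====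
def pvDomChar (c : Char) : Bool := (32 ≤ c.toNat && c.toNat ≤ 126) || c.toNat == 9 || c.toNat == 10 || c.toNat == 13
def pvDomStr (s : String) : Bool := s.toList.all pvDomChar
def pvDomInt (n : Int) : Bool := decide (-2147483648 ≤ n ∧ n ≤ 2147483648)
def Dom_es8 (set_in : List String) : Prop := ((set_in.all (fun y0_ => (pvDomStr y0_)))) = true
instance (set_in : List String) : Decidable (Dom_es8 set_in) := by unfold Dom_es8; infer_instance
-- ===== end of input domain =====

-- B replaces A's all-pairs scan with a hash index (overlap length, prefix) → strings,
-- built once, so each string's suffixes are looked up directly (faster in a timing run).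

-- ===== PORT A =====
def es8 (set_in : List String) : List String :=
  let ls_fin : List String := (PySem.Set.ofList set_in).foldl (fun acc p =>
    (PySem.Set.diff (PySem.Set.ofList set_in) [p]).foldl (fun acc p2 =>
      (PySem.List.pyRange 2 (PySem.Str.len p + 1) 1).foldl (fun acc i =>
        if PySem.Str.slice p (some (-i)) none == PySem.Str.slice p2 none (some i) then
          acc ++ [p ++ PySem.Str.slice p2 (some i) none]
        else acc) acc) acc) []
  PySem.List.sorted (PySem.Set.ofList ls_fin) (fun x => x) false

-- ===== PORT B =====
def es8_alt (set_in : List String) : List String :=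
  let s := PySem.Set.ofList set_in
  let index : PySem.Dict (Int × String) (List (String × String)) :=
    s.foldl (fun d q =>
      (PySem.List.pyRange 2 (PySem.Str.len q + 1) 1).foldl (fun d i =>
        d.modify (i, PySem.Str.slice q none (some i)) []
          (· ++ [(q, PySem.Str.slice q (some i) none)])) d)
      PySem.Dict.empty
  let out : PySem.Set String := s.foldl (fun out p =>
    (PySem.List.pyRange 2 (PySem.Str.len p + 1) 1).foldl (fun out i =>
      (index.getD (i, PySem.Str.slice p (some (-i)) none) []).foldl (fun out qr =>
        if qr.1 != p then PySem.Set.add out (p ++ qr.2) else out) out) out) []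
  PySem.List.sorted out (fun x => x) false

-- ===== PRECONDITION & SPEC =====
def Spec_es8 (set_in : List String) (out : List String) : Prop := out = es8_alt set_in
instance (set_in : List String) (out : List String) : Decidable (Spec_es8 set_in out) := by unfold Spec_es8; infer_instance

-- ===== CLAIM (what is proved, stated in full; the proofs are below) =====
def Claim_equal_es8 : Prop := ∀ (set_in : List String), Dom_es8 set_in → Spec_es8 set_in (es8 set_in)

-- ===== LEMMAS AND PROOFS =====

-- generic: membership through a foldl whose step satisfies a mem-characterisation
theorem pv_mem_foldl {α β : Type} (x : α) (f : List α → β → List α) (P : β → Prop)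
    (h : ∀ s e, x ∈ f s e ↔ x ∈ s ∨ P e) :
    ∀ (l : List β) (s0 : List α), x ∈ l.foldl f s0 ↔ x ∈ s0 ∨ ∃ e ∈ l, P e := by
  intro l
  induction l with
  | nil => simp
  | cons b bs ih =>
    intro s0
    simp [List.foldl_cons, ih, h]
    tauto

-- generic: Nodup through a foldl whose step preserves it
theorem pv_nodup_foldl {α β : Type} (f : List α → β → List α)
    (h : ∀ s e, s.Nodup → (f s e).Nodup) :
    ∀ (l : List β) (s0 : List α), s0.Nodup → (l.foldl f s0).Nodup := by
  intro l
  induction l with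
  | nil => exact fun _ h => h
  | cons b bs ih => intro s0 h0; exact ih _ (h _ _ h0)

-- the merge condition of A, as a Prop
def pvCond (p q : String) (i : Int) : Prop :=
  PySem.Str.slice p (some (-i)) none = PySem.Str.slice q none (some i)

-- A-side: membership in es8's accumulated list
theorem pv_mem_A (set_in : List String) (x : String) :
    (x ∈ (PySem.Set.ofList set_in).foldl (fun acc p =>
      (PySem.Set.diff (PySem.Set.ofList set_in) [p]).foldl (fun acc p2 =>
        (PySem.List.pyRange 2 (PySem.Str.len p + 1) 1).foldl (fun acc i =>
          if PySem.Str.slice p (some (-i)) none == PySem.Str.slice p2 none (some i) then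
            acc ++ [p ++ PySem.Str.slice p2 (some i) none]
          else acc) acc) acc) []) ↔
    ∃ p ∈ set_in, ∃ q ∈ set_in, q ≠ p ∧ ∃ i : Int, 2 ≤ i ∧ i < PySem.Str.len p + 1 ∧
      pvCond p q i ∧ x = p ++ PySem.Str.slice q (some i) none := by
  rw [pv_mem_foldl x _ (fun p => ∃ q ∈ PySem.Set.diff (PySem.Set.ofList set_in) [p],
        ∃ i ∈ PySem.List.pyRange 2 (PySem.Str.len p + 1) 1,
          pvCond p q i ∧ x = p ++ PySem.Str.slice q (some i) none) ?_]
  · simp only [PySem.Set.mem_ofList, PySem.Set.mem_diff, PySem.List.mem_pyRange_one,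
      List.mem_singleton, List.not_mem_nil, false_or, pvCond]
    constructor
    · rintro ⟨p, hp, q, ⟨hq, hqp⟩, i, ⟨h2, hi⟩, hc, hx⟩
      exact ⟨p, hp, q, hq, hqp, i, h2, hi, hc, hx⟩
    · rintro ⟨p, hp, q, hq, hqp, i, h2, hi, hc, hx⟩
      exact ⟨p, hp, q, ⟨hq, hqp⟩, i, ⟨h2, hi⟩, hc, hx⟩
  · intro s p
    rw [pv_mem_foldl x _ (fun q => ∃ i ∈ PySem.List.pyRange 2 (PySem.Str.len p + 1) 1,
          pvCond p q i ∧ x = p ++ PySem.Str.slice q (some i) none) ?_]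
    intro s q
    rw [pv_mem_foldl x _ (fun i => pvCond p q i ∧ x = p ++ PySem.Str.slice q (some i) none) ?_]
    intro s i
    by_cases hc : PySem.Str.slice p (some (-i)) none = PySem.Str.slice q none (some i) <;>
      simp [hc, pvCond]

-- B-side: what one bucket of the index holds after the build loop
theorem pv_mem_index (set_in : List String) (k : Int × String) (e : String × String) :
    (e ∈ ((PySem.Set.ofList set_in).foldl (fun d q =>
      (PySem.List.pyRange 2 (PySem.Str.len q + 1) 1).foldl (fun d i =>
        d.modify (i, PySem.Str.slice q none (some i)) []
          (· ++ [(q, PySem.Str.slice q (some i) none)])) d)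
      PySem.Dict.empty).getD k []) ↔
    ∃ q ∈ set_in, ∃ i : Int, 2 ≤ i ∧ i < PySem.Str.len q + 1 ∧
      k = (i, PySem.Str.slice q none (some i)) ∧ e = (q, PySem.Str.slice q (some i) none) := by
  have h1 : ∀ (q : String) (d : PySem.Dict (Int × String) (List (String × String))),
      (PySem.List.pyRange 2 (PySem.Str.len q + 1) 1).foldl (fun d i =>
        d.modify (i, PySem.Str.slice q none (some i)) []
          (· ++ [(q, PySem.Str.slice q (some i) none)])) d
      = ((PySem.List.pyRange 2 (PySem.Str.len q + 1) 1).map (fun i =>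
          ((i, PySem.Str.slice q none (some i)), (q, PySem.Str.slice q (some i) none)))).foldl
          (fun d pr => d.modify pr.1 [] (· ++ [pr.2])) d := by
    intro q d
    rw [List.foldl_map]
  simp only [h1]
  rw [← List.foldl_flatMap]
  rw [PySem.Dict.getD_foldl_modify_append]
  simp only [PySem.Dict.getD_empty, List.nil_append, List.mem_map, List.mem_filter,
    List.mem_flatMap, PySem.Set.mem_ofList, PySem.List.mem_pyRange_one]
  constructor
  · rintro ⟨pr, ⟨⟨q, hq, i, ⟨h2, hi⟩, rfl⟩, hk⟩, rfl⟩
    rw [beq_iff_eq] at hk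
    exact ⟨q, hq, i, h2, hi, hk.symm, rfl⟩
  · rintro ⟨q, hq, i, h2, hi, rfl, rfl⟩
    exact ⟨_, ⟨⟨q, hq, i, ⟨h2, hi⟩, rfl⟩, beq_self_eq_true _⟩, rfl⟩

-- A's test can only succeed when the overlap fits inside q
theorem pv_cond_le (p q : String) (i : Int) (h2 : 2 ≤ i) (hp : i < PySem.Str.len p + 1)
    (hc : pvCond p q i) : i < PySem.Str.len q + 1 := by
  have hik : i = ((i.toNat : Nat) : Int) := (Int.toNat_of_nonneg (by omega)).symm
  have htl := congrArg String.toList hc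
  simp only [PySem.Str.toList_slice, PySem.Chars.slice_eq_listSlice] at htl
  rw [hik, PySem.List.slice_from_neg_natCast _ _ (by omega), PySem.List.slice_to_natCast] at htl
  have hlen := congrArg List.length htl
  simp only [List.length_drop, List.length_take] at hlen
  have hp' : (PySem.Str.len p : Int) = (p.toList.length : Int) := by simp
  have hq' : (PySem.Str.len q : Int) = (q.toList.length : Int) := by simp
  omega

-- B-side: membership in the result set built by the lookup loop
theorem pv_mem_B (set_in : List String) (x : String)
    (index : PySem.Dict (Int × String) (List (String × String))) :
    (x ∈ (PySem.Set.ofList set_in).foldl (fun out p =>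
      (PySem.List.pyRange 2 (PySem.Str.len p + 1) 1).foldl (fun out i =>
        (index.getD (i, PySem.Str.slice p (some (-i)) none) []).foldl (fun out qr =>
          if qr.1 != p then PySem.Set.add out (p ++ qr.2) else out) out) out)
      ([] : PySem.Set String)) ↔
    ∃ p ∈ set_in, ∃ i : Int, 2 ≤ i ∧ i < PySem.Str.len p + 1 ∧
      ∃ qr ∈ index.getD (i, PySem.Str.slice p (some (-i)) none) [],
        qr.1 ≠ p ∧ x = p ++ qr.2 := by
  rw [pv_mem_foldl x _ (fun p => ∃ i ∈ PySem.List.pyRange 2 (PySem.Str.len p + 1) 1,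
        ∃ qr ∈ index.getD (i, PySem.Str.slice p (some (-i)) none) [],
          qr.1 ≠ p ∧ x = p ++ qr.2) ?_]
  · simp only [PySem.Set.mem_ofList, PySem.List.mem_pyRange_one, List.not_mem_nil, false_or]
    constructor
    · rintro ⟨p, hp, i, ⟨h2, hi⟩, hrest⟩
      exact ⟨p, hp, i, h2, hi, hrest⟩
    · rintro ⟨p, hp, i, h2, hi, hrest⟩
      exact ⟨p, hp, i, ⟨h2, hi⟩, hrest⟩
  · intro s p
    rw [pv_mem_foldl x _ (fun i => ∃ qr ∈ index.getD (i, PySem.Str.slice p (some (-i)) none) [],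
          qr.1 ≠ p ∧ x = p ++ qr.2) ?_]
    intro s i
    rw [pv_mem_foldl x _ (fun qr => qr.1 ≠ p ∧ x = p ++ qr.2) ?_]
    intro s qr
    by_cases hqp : qr.1 = p <;> simp [hqp, PySem.Set.mem_add]

-- the result set of B has no duplicates
theorem pv_nodup_B (set_in : List String)
    (index : PySem.Dict (Int × String) (List (String × String))) :
    ((PySem.Set.ofList set_in).foldl (fun out p =>
      (PySem.List.pyRange 2 (PySem.Str.len p + 1) 1).foldl (fun out i =>
        (index.getD (i, PySem.Str.slice p (some (-i)) none) []).foldl (fun out qr =>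
          if qr.1 != p then PySem.Set.add out (p ++ qr.2) else out) out) out)
      ([] : PySem.Set String)).Nodup := by
  refine pv_nodup_foldl _ ?_ _ _ List.nodup_nil
  intro s p hs
  refine pv_nodup_foldl _ ?_ _ _ hs
  intro s i hs
  refine pv_nodup_foldl _ ?_ _ _ hs
  intro s qr hs
  by_cases hqp : qr.1 != p <;> simp [hqp, PySem.Set.nodup_add, hs]

-- ===== VERDICT (by name: the statement is the Claim_ definition above) =====
theorem es8_spec : Claim_equal_es8 := by
  intro set_in _
  unfold Spec_es8 es8 es8_alt
  simp only []
  apply Eq.symm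
  apply PySem.List.sorted_eq_of_perm_of_pairwise_lt
  · refine (PySem.List.sorted_perm _ _ _).trans ?_
    rw [List.perm_ext_iff_of_nodup (PySem.Set.nodup_ofList _) (pv_nodup_B _ _)]
    intro a
    rw [PySem.Set.mem_ofList, pv_mem_A, pv_mem_B]
    constructor
    · rintro ⟨p, hp, q, hq, hqp, i, h2, hi, hc, rfl⟩
      refine ⟨p, hp, i, h2, hi, (q, PySem.Str.slice q (some i) none), ?_, hqp, rfl⟩
      exact (pv_mem_index set_in _ _).mpr
        ⟨q, hq, i, h2, pv_cond_le p q i h2 hi hc, by rw [Prod.mk.injEq]; exact ⟨rfl, hc⟩, rfl⟩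
    · rintro ⟨p, hp, i, h2, hi, qr, hqr, hne, rfl⟩
      obtain ⟨q, hq, i', h2', hi', hkey, rfl⟩ := (pv_mem_index set_in _ _).mp hqr
      obtain ⟨rfl, hpre⟩ := Prod.mk.injEq .. ▸ hkey
      exact ⟨p, hp, q, hq, hne, i, h2, hi, hpre, rfl⟩
  · exact PySem.List.sorted_ofList_pairwise_lt _
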